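-- pv_equiv track=rewrite | github.com/nishantsirohi23/projects | leetcode/geeks/c1.py | maximum_good_length
-- ===== SOURCE A (Python) =====
-- def maximum_good_length(A):
--     N = len(A)     # Number of rows
--     M = len(A[0])  # Number of columns
--
--     low = 1
--     high = min(N, M)
--     max_good_length = 0
--
--     def isGoodLength(L):
--         for i in range(N - L + 1):
--             for j in range(M - L + 1):
--                 if all(A[x][y] >= L for x in range(i, i + L) for y in range(j, j + L)):
--                     return True
--         return False
--
--     while low <= high:
--         mid = (low + high) // 2
--         if isGoodLength(mid):
--             max_good_length = mid
--             low = mid + 1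
--         else:
--             high = mid - 1
--
--     return max_good_length
-- ===== SOURCE B (Python) =====
-- def maximum_good_length(A):
--     N = len(A)
--     M = len(A[0])
--
--     def prefix_bad(row, L):
--         # p[j] = number of entries < L among the first j elements of row
--         p = [0]
--         c = 0
--         for v in row:
--             if v < L:
--                 c += 1
--             p.append(c)
--         return p
--
--     def good(L):
--         P = [prefix_bad(row, L) for row in A]
--         for i in range(N - L + 1):
--             for j in range(M - L + 1):
--                 if all(P[x][j + L] == P[x][j] for x in range(i, i + L)):
--                     return True
--         return False
--
--     # good is antitone in L, so the first hit of a descending scan is the answer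
--     for L in range(min(N, M), 0, -1):
--         if good(L):
--             return L
--     return 0
-- ===== Notes on version B (the rewrite author's own statement) =====
-- stated objective: alternative
-- what changed: the binary search over L is replaced by a descending linear scan returning the first good L, and the brute-force all-cells window check is replaced by per-row prefix counts of entries < L, verifying each window by comparing two prefix values per row
-- outside the precondition, e.g. on maximum_good_length([[3, 121], [-2], [-1, 10]]): A returns 1, B raises IndexError; on maximum_good_length([[0, 5], [5]]): A returns 1, B returns 1
import Mathlib
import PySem

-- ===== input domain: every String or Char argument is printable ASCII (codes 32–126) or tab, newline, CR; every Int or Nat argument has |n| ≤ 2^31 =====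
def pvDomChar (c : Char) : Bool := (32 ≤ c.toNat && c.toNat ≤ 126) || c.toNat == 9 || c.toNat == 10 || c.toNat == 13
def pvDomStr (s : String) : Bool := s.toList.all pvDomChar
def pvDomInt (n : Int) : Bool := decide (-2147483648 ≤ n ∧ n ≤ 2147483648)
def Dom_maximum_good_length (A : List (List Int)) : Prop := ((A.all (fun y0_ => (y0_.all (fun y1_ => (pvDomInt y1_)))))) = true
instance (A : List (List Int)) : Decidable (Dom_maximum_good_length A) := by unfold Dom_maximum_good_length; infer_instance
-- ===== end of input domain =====

-- B replaces A's binary search by a descending linear scan (first good L is the answer) and the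
-- all-cells window check by per-row prefix counts of entries < L (objective: alternative).

-- ===== PORT A =====
-- isGoodLength(L): scan all top-left corners, check every cell of the L×L window ≥ L.
def pvIsGoodA (A : List (List Int)) (N M L : Nat) : Bool :=
  (List.range (N - L + 1)).any fun i =>
    (List.range (M - L + 1)).any fun j =>
      (List.range' i L).all fun x =>
        (List.range' j L).all fun y =>
          decide ((L : Int) ≤ (A.getD x []).getD y 0)

-- the binary-search while-loop of A (fuel only makes the recursion structural; it is never exhausted)
def pvLoopA (A : List (List Int)) (N M : Nat) : Nat → Nat → Nat → Nat → Nat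
  | 0, _, _, best => best
  | fuel + 1, low, high, best =>
    if low ≤ high then
      let mid := (low + high) / 2
      if pvIsGoodA A N M mid then pvLoopA A N M fuel (mid + 1) high mid
      else pvLoopA A N M fuel low (mid - 1) best
    else best

def maximum_good_length (A : List (List Int)) : Int :=
  ((pvLoopA A A.length (A.headD []).length (min A.length (A.headD []).length + 1) 1 (min A.length (A.headD []).length) 0 : Nat) : Int)

-- ===== PORT B =====
-- prefix_bad(row, L) of Source B: p[j] = number of entries < L among the first j elements of row
def pvPrefixBad (LL : Int) (c : Int) : List Int → List Int
  | [] => [c]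
  | v :: r => c :: pvPrefixBad LL (if v < LL then c + 1 else c) r

-- good(L) of Source B: a window is good iff every of its L rows has equal bad-prefix counts at both window edges
def pvGoodB (A : List (List Int)) (N M L : Nat) : Bool :=
  let P := A.map fun row => pvPrefixBad (L : Int) 0 row
  (List.range (N - L + 1)).any fun i =>
    (List.range (M - L + 1)).any fun j =>
      (List.range' i L).all fun x =>
        ((P.getD x []).getD (j + L) 0 == (P.getD x []).getD j 0)

-- the descending for-loop of Source B: first L (from min(N,M) down) with good(L), else 0
def pvScanB (A : List (List Int)) (N M : Nat) : Nat → Nat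
  | 0 => 0
  | L + 1 => if pvGoodB A N M (L + 1) then L + 1 else pvScanB A N M L

def maximum_good_length_alt (A : List (List Int)) : Int :=
  ((pvScanB A A.length (A.headD []).length (min A.length (A.headD []).length) : Nat) : Int)

-- ===== PRECONDITION & SPEC =====
-- Pre_ excludes the empty list (A[0] raises IndexError) and matrices with a row shorter than the
-- first row, on which A usually raises IndexError and returns only when short-circuit evaluation
-- happens to avoid reading past the short row.
def Pre_maximum_good_length (A : List (List Int)) : Prop :=
  A ≠ [] ∧ ∀ r ∈ A, (A.headD []).length ≤ r.length
instance (A : List (List Int)) : Decidable (Pre_maximum_good_length A) := by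
  unfold Pre_maximum_good_length; infer_instance

def pvWitness_maximum_good_length : List (List Int) := [[1]]

def Spec_maximum_good_length (A : List (List Int)) (out : Int) : Prop := out = maximum_good_length_alt A
instance (A : List (List Int)) (out : Int) : Decidable (Spec_maximum_good_length A out) := by unfold Spec_maximum_good_length; infer_instance

-- ===== CLAIM (what is proved, stated in full; the proofs are below) =====
def Claim_equal_maximum_good_length : Prop := ∀ (A : List (List Int)), Dom_maximum_good_length A → Pre_maximum_good_length A → Spec_maximum_good_length A (maximum_good_length A)

-- ===== LEMMAS AND PROOFS =====

-- r is the largest L ≤ H with P L (or 0 if none)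
def pvIsMaxGood (P : Nat → Bool) (H r : Nat) : Prop :=
  r ≤ H ∧ (r = 0 ∨ P r = true) ∧ ∀ L, r < L → L ≤ H → P L = false

theorem pvIsMaxGood_unique (P : Nat → Bool) (H r₁ r₂ : Nat)
    (h₁ : pvIsMaxGood P H r₁) (h₂ : pvIsMaxGood P H r₂) : r₁ = r₂ := by
  obtain ⟨hH₁, hP₁, hA₁⟩ := h₁
  obtain ⟨hH₂, hP₂, hA₂⟩ := h₂
  by_contra hne
  rcases Nat.lt_or_ge r₁ r₂ with h | h
  · have := hA₁ r₂ h hH₂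
    rcases hP₂ with h0 | hp
    · omega
    · rw [this] at hp; exact absurd hp (by simp)
  · have hlt : r₂ < r₁ := by omega
    have := hA₂ r₁ hlt hH₁
    rcases hP₁ with h0 | hp
    · omega
    · rw [this] at hp; exact absurd hp (by simp)

theorem pvIsMaxGood_congr (P Q : Nat → Bool) (H r : Nat)
    (heq : ∀ L, 1 ≤ L → L ≤ H → P L = Q L) (h : pvIsMaxGood P H r) : pvIsMaxGood Q H r := by
  obtain ⟨hH, hP, hA⟩ := h
  refine ⟨hH, ?_, ?_⟩
  · rcases hP with h0 | hp
    · exact Or.inl h0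
    · rcases Nat.eq_zero_or_pos r with h0 | h1
      · exact Or.inl h0
      · exact Or.inr ((heq r h1 hH).symm.trans hp)
  · intro L hrL hLH
    rw [← heq L (by omega) hLH]
    exact hA L hrL hLH

-- the descending scan computes the largest good L
theorem pvScanB_spec (A : List (List Int)) (N M : Nat) :
    ∀ H, pvIsMaxGood (pvGoodB A N M) H (pvScanB A N M H) := by
  intro H
  induction H with
  | zero => exact ⟨Nat.le_refl 0, Or.inl rfl, fun L h1 h2 => by omega⟩
  | succ H ih =>
      simp only [pvScanB]
      by_cases hg : pvGoodB A N M (H + 1) = true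
      · simp only [hg, if_pos]
        exact ⟨Nat.le_refl _, Or.inr hg, fun L h1 h2 => by omega⟩
      · simp only [Bool.not_eq_true] at hg
        simp only [hg, Bool.false_eq_true, if_neg, not_false_iff]
        obtain ⟨hH, hP, hA⟩ := ih
        refine ⟨by omega, hP, fun L h1 h2 => ?_⟩
        rcases Nat.lt_or_ge L (H + 1) with h | h
        · exact hA L h1 (by omega)
        · have : L = H + 1 := by omega
          rw [this]; exact hg

-- A's check is antitone in L: a good L×L window contains a good L'×L' window for L' ≤ L
theorem pvIsGoodA_mono (A : List (List Int)) (N M : Nat) (L L' : Nat) (hLL : L' ≤ L)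
    (h : pvIsGoodA A N M L = true) : pvIsGoodA A N M L' = true := by
  simp only [pvIsGoodA, List.any_eq_true, List.all_eq_true, List.mem_range, List.mem_range'_1,
    decide_eq_true_eq] at h ⊢
  obtain ⟨i, hi, j, hj, hall⟩ := h
  refine ⟨i, by omega, j, by omega, fun x hx y hy => ?_⟩
  have := hall x ⟨hx.1, by omega⟩ y ⟨hy.1, by omega⟩
  have hc : (L' : Int) ≤ (L : Int) := by exact_mod_cast hLL
  omega

-- the binary-search loop computes the largest good L (antitonicity justifies discarding halves)
theorem pvLoopA_spec (A : List (List Int)) (N M H0 : Nat) :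
    ∀ (fuel low high best : Nat), 1 ≤ low → best + 1 = low → low ≤ high + 1 → high ≤ H0 →
      (best = 0 ∨ pvIsGoodA A N M best = true) →
      (∀ L, high < L → L ≤ H0 → pvIsGoodA A N M L = false) →
      high + 2 ≤ fuel + low →
      pvIsMaxGood (pvIsGoodA A N M) H0 (pvLoopA A N M fuel low high best) := by
  intro fuel
  induction fuel with
  | zero => intro low high best h1 hb hlh hH hP hA hf; omega
  | succ fuel ih =>
      intro low high best h1 hb hlh hH hP hA hf
      simp only [pvLoopA]
      by_cases hc : low ≤ high
      · simp only [if_pos hc]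
        have hmid1 : low ≤ (low + high) / 2 := by omega
        have hmidh : (low + high) / 2 ≤ high := by omega
        by_cases hg : pvIsGoodA A N M ((low + high) / 2) = true
        · simp only [hg, if_pos]
          exact ih _ _ _ (by omega) rfl (by omega) hH (Or.inr hg) hA (by omega)
        · simp only [Bool.not_eq_true] at hg
          simp only [hg, Bool.false_eq_true, if_neg, not_false_iff]
          refine ih _ _ _ h1 hb (by omega) (by omega) hP ?_ (by omega)
          intro L hL hLH
          rcases Nat.lt_or_ge high L with h | h
          · exact hA L h hLH
          · -- (low+high)/2 ≤ L ≤ high: good L would imply good mid by antitonicity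
            rw [← Bool.not_eq_true]
            intro hLg
            have := pvIsGoodA_mono A N M L ((low + high) / 2) (by omega) hLg
            rw [hg] at this; exact absurd this (by simp)
      · simp only [if_neg hc]
        refine ⟨by omega, hP, fun L hL hLH => hA L (by omega) hLH⟩

-- the bad-prefix list indexes to the count of entries < LL among the first j elements
theorem pvPrefixBad_getD (LL : Int) :
    ∀ (row : List Int) (c : Int) (j : Nat), j ≤ row.length →
      (pvPrefixBad LL c row).getD j 0 = c + (((row.take j).countP fun v => decide (v < LL) : Nat) : Int) := by
  intro row
  induction row with
  | nil =>
      intro c j hj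
      have : j = 0 := by simpa using hj
      subst this
      simp [pvPrefixBad]
  | cons v r ih =>
      intro c j hj
      cases j with
      | zero => simp [pvPrefixBad]
      | succ j =>
          have hj' : j ≤ r.length := by simpa using hj
          simp only [pvPrefixBad, List.getD_cons_succ, List.take_succ_cons, List.countP_cons]
          rw [ih _ j hj']
          by_cases hv : v < LL
          · simp only [hv, if_pos, decide_true, Nat.cast_add, Nat.cast_one]
            ring
          · simp [hv]

-- equal bad-prefix counts at the window edges ⟺ every entry of the column slice is ≥ LL
theorem pvWindow_eq (LL : Int) (row : List Int) (j L' : Nat) (h : j + L' ≤ row.length) :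
    ((pvPrefixBad LL 0 row).getD (j + L') 0 == (pvPrefixBad LL 0 row).getD j 0) =
      ((List.range' j L').all fun y => decide (LL ≤ row.getD y 0)) := by
  rw [pvPrefixBad_getD LL row 0 (j + L') h, pvPrefixBad_getD LL row 0 j (by omega)]
  rw [Bool.eq_iff_iff]
  simp only [beq_iff_eq, List.all_eq_true, List.mem_range'_1, decide_eq_true_eq]
  have hsplit : row.take (j + L') = row.take j ++ (row.drop j).take L' := by
    rw [← List.take_add]
  have hslen : ((row.drop j).take L').length = L' := by
    simp [List.length_take, List.length_drop]; omega
  rw [hsplit, List.countP_append]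
  constructor
  · intro hc y hy
    have hcnt : ((row.drop j).take L').countP (fun v => decide (v < LL)) = 0 := by omega
    rw [List.countP_eq_zero] at hcnt
    have hylt : y < row.length := by omega
    have hmem : row[y] ∈ (row.drop j).take L' := by
      have hidx : y - j < ((row.drop j).take L').length := by omega
      have : ((row.drop j).take L')[y - j] = row[y] := by
        rw [List.getElem_take, List.getElem_drop]
        congr 1; omega
      rw [← this]
      exact List.getElem_mem hidx
    have := hcnt _ hmem
    simp only [decide_eq_true_eq] at this
    rw [List.getD_eq_getElem row 0 hylt]
    omega
  · intro hgood
    have hcnt : ((row.drop j).take L').countP (fun v => decide (v < LL)) = 0 := by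
      rw [List.countP_eq_zero]
      intro v hv
      rw [List.mem_iff_getElem] at hv
      obtain ⟨k, hk, hkv⟩ := hv
      rw [List.getElem_take, List.getElem_drop] at hkv
      have hjk : j + k < row.length := by omega
      have := hgood (j + k) ⟨by omega, by omega⟩
      rw [List.getD_eq_getElem row 0 hjk] at this
      simp only [decide_eq_true_eq]
      omega
    omega

-- the two checks agree on rectangular matrices for every candidate length in range
theorem pvCheck_eq (A : List (List Int)) (M L : Nat)
    (hrect : ∀ r ∈ A, M ≤ r.length) (_hL1 : 1 ≤ L) (hLN : L ≤ A.length) (hLM : L ≤ M) :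
    pvIsGoodA A A.length M L = pvGoodB A A.length M L := by
  have key : ∀ i, i < A.length - L + 1 → ∀ j, j < M - L + 1 → ∀ x, i ≤ x → x < i + L →
      ((((A.map fun row => pvPrefixBad (L : Int) 0 row).getD x []).getD (j + L) 0 ==
          ((A.map fun row => pvPrefixBad (L : Int) 0 row).getD x []).getD j 0)
        = ((List.range' j L).all fun y => decide ((L : Int) ≤ (A.getD x []).getD y 0))) := by
    intro i hi j hj x hxl hxr
    have hx : x < A.length := by omega
    have hmap : (A.map fun row => pvPrefixBad (L : Int) 0 row).getD x []
        = pvPrefixBad (L : Int) 0 (A.getD x []) := by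
      rw [List.getD_eq_getElem _ _ (by simpa using hx), List.getElem_map,
        List.getD_eq_getElem _ _ hx]
    have hmem : A.getD x [] ∈ A := by
      rw [List.getD_eq_getElem _ _ hx]; exact List.getElem_mem hx
    have hlen : M ≤ (A.getD x []).length := hrect _ hmem
    rw [hmap]
    exact pvWindow_eq (L : Int) (A.getD x []) j L (by omega)
  simp only [pvIsGoodA, pvGoodB]
  rw [Bool.eq_iff_iff]
  simp only [List.any_eq_true, List.all_eq_true, List.mem_range, List.mem_range'_1]
  constructor
  · rintro ⟨i, hi, j, hj, hall⟩
    refine ⟨i, hi, j, hj, fun x hx => ?_⟩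
    rw [key i hi j hj x hx.1 hx.2]
    simp only [List.all_eq_true, List.mem_range'_1]
    exact hall x hx
  · rintro ⟨i, hi, j, hj, hall⟩
    refine ⟨i, hi, j, hj, fun x hx => ?_⟩
    have := hall x hx
    rw [key i hi j hj x hx.1 hx.2] at this
    simp only [List.all_eq_true, List.mem_range'_1] at this
    exact this

-- ===== VERDICT (by name: the statement is the Claim_ definition above) =====
theorem maximum_good_length_spec : Claim_equal_maximum_good_length := by
  intro A _ hpre
  unfold Spec_maximum_good_length maximum_good_length maximum_good_length_alt
  set N := A.length
  set M := (A.headD []).length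
  have hloop : pvIsMaxGood (pvIsGoodA A N M) (min N M)
      (pvLoopA A N M (min N M + 1) 1 (min N M) 0) :=
    pvLoopA_spec A N M (min N M) (min N M + 1) 1 (min N M) 0
      (by omega) rfl (by omega) (by omega) (Or.inl rfl) (fun L h1 h2 => by omega) (by omega)
  have hscan : pvIsMaxGood (pvGoodB A N M) (min N M) (pvScanB A N M (min N M)) :=
    pvScanB_spec A N M (min N M)
  have hloop' : pvIsMaxGood (pvGoodB A N M) (min N M)
      (pvLoopA A N M (min N M + 1) 1 (min N M) 0) := by
    refine pvIsMaxGood_congr _ _ _ _ (fun L h1 h2 => ?_) hloop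
    exact pvCheck_eq A M L hpre.2 h1 (by omega) (by omega)
  have := pvIsMaxGood_unique _ _ _ _ hloop' hscan
  exact congrArg (fun n : Nat => (n : Int)) this
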